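-- pv_equiv track=rewrite | github.com/Sypheos/sync-docs-confluence | script.py | removeLastDirFromFilepath
-- ===== SOURCE A (Python) =====
-- def replaceBetween(startIndex, endIndex, oldStr, replacement):
--     string = oldStr[0:startIndex] + replacement + oldStr[endIndex+1:]
--     return string
--
-- def removeLastDirFromFilepath(filepath):
--     i=0
--     if(filepath.endswith("/") and len(filepath)>1):
--         filepath = replaceBetween(len(filepath)-1, len(filepath), filepath, "")
--     while(i<len(filepath)):
--         res = filepath.find("/", i)
--         if res < 0 :
--             break
--         else:
--             i = res + 1
--     if i == len(filepath):
--         return ""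
--     else:
--         withoutLastDir = replaceBetween(i, len(filepath), filepath, "")
--         return withoutLastDir
-- ===== SOURCE B (Python) =====
-- def removeLastDirFromFilepath(filepath):
--     if filepath.endswith("/") and len(filepath) > 1:
--         filepath = filepath[:-1]
--     head, sep, tail = filepath.rpartition("/")
--     if tail == "":
--         return ""
--     return head + sep
-- ===== Notes on version B (the rewrite author's own statement) =====
-- stated objective: idiomatic
-- what changed: A's advancing find-loop (repeated str.find calls walking past each slash, then a slice rebuild) is replaced by a single rpartition of the stripped path; the empty-tail test reproduces A's empty-string results.
import Mathlib
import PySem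

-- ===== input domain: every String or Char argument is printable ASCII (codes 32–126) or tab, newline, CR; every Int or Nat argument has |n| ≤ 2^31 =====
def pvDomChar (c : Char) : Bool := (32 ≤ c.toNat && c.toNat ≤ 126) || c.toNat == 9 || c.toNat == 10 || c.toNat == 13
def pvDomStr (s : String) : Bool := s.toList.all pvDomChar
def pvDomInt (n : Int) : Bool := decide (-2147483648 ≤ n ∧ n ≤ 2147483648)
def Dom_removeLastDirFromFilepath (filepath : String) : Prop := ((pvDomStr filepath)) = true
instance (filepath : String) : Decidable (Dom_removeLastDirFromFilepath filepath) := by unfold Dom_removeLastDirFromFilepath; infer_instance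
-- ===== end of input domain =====

-- B replaces A's advancing find-loop by a single rpartition on the stripped path (idiomatic; same cost).

-- ===== PORT A =====
def replaceBetween (startIndex endIndex : Int) (oldStr replacement : String) : String :=
  String.ofList (PySem.Chars.slice oldStr.toList (some 0) (some startIndex)
             ++ replacement.toList
             ++ PySem.Chars.slice oldStr.toList (some (endIndex + 1)) none)

-- A's while-loop: i advances to (found '/')+1; terminates because find returns an index ≥ i.
def loopA (cs : List Char) (i : Nat) : Nat :=
  if h : i < cs.length then
    let res := PySem.Chars.findFrom cs ['/'] (i : Int) none
    if hr : res < 0 then i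
    else loopA cs (res.toNat + 1)
  else i
termination_by cs.length - i
decreasing_by
  have hs := PySem.Chars.findFrom_natCast_spec cs ['/'] i (le_of_lt h) (by omega)
  have h2 : ['/'] <+: cs.drop (PySem.Chars.findFrom cs ['/'] (i : Int) none).toNat := hs.2.1
  have h3 : (PySem.Chars.findFrom cs ['/'] (i : Int) none).toNat < cs.length := by
    by_contra hc
    have : cs.drop (PySem.Chars.findFrom cs ['/'] (i : Int) none).toNat = [] :=
      List.drop_eq_nil_of_le (by omega)
    simp [this] at h2
  omega

def removeLastDirFromFilepath (filepath : String) : String :=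
  let fp := if PySem.Str.endswith filepath "/" && decide (1 < PySem.Str.len filepath)
            then replaceBetween ((PySem.Str.len filepath : Int) - 1) (PySem.Str.len filepath) filepath ""
            else filepath
  let i := loopA fp.toList 0
  if i = PySem.Str.len fp then ""
  else replaceBetween (i : Int) (PySem.Str.len fp) fp ""

-- ===== PORT B =====
-- hand port of str.rpartition for a one-character separator (PySem has no rpartition);
-- exact on every input: (head, sep, tail) around the LAST occurrence, or ([], [], s) if absent.
def rpart (sep : Char) : List Char → List Char × List Char × List Char
  | [] => ([], [], [])
  | c :: rest =>
    match rpart sep rest with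
    | (_, [], _) => if c = sep then ([], [sep], rest) else ([], [], c :: rest)
    | (h, s, t) => (c :: h, s, t)

def removeLastDirFromFilepath_alt (filepath : String) : String :=
  let fp := if PySem.Str.endswith filepath "/" && decide (1 < PySem.Str.len filepath)
            then String.ofList (PySem.Chars.slice filepath.toList none (some (-1)))
            else filepath
  match rpart '/' fp.toList with
  | (h, s, t) => if t = [] then "" else String.ofList (h ++ s)

-- ===== PRECONDITION & SPEC =====
def Spec_removeLastDirFromFilepath (filepath : String) (out : String) : Prop := out = removeLastDirFromFilepath_alt filepath
instance (filepath : String) (out : String) : Decidable (Spec_removeLastDirFromFilepath filepath out) := by unfold Spec_removeLastDirFromFilepath; infer_instance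

-- ===== CLAIM (what is proved, stated in full; the proofs are below) =====
def Claim_equal_removeLastDirFromFilepath : Prop := ∀ (filepath : String), Dom_removeLastDirFromFilepath filepath → Spec_removeLastDirFromFilepath filepath (removeLastDirFromFilepath filepath)

-- ===== LEMMAS AND PROOFS =====

-- index of the LAST '/' in a list: the common characterisation of A's loop and B's rpartition
def lastIdx : List Char → Option Nat
  | [] => none
  | c :: rest =>
    match lastIdx rest with
    | some j => some (j + 1)
    | none => if c = '/' then some 0 else none

def shiftIdx : Option Nat → Nat → Nat
  | some j, k => k + 1 + j
  | none, k => k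
def afterLast : Option Nat → Nat → Nat
  | none, i => i
  | some j, i => i + j + 1

theorem lastIdx_eq_none_iff (cs : List Char) : lastIdx cs = none ↔ '/' ∉ cs := by
  induction cs with
  | nil => simp [lastIdx]
  | cons c rest ih =>
    cases hl : lastIdx rest with
    | some j =>
      have hm : '/' ∈ rest := by by_contra hm; simp [ih.mpr hm] at hl
      simp [lastIdx, hl, hm]
    | none =>
      have hm : '/' ∉ rest := ih.mp hl
      by_cases hc : c = '/' <;> simp [lastIdx, hl, hc, hm, eq_comm]

theorem lastIdx_shift (cs : List Char) (k : Nat) (hk : k < cs.length) (hc : cs[k]? = some '/') :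
    lastIdx cs = some (shiftIdx (lastIdx (cs.drop (k + 1))) k) := by
  induction cs generalizing k with
  | nil => simp at hk
  | cons c rest ih =>
    cases k with
    | zero =>
      simp only [List.getElem?_cons_zero, Option.some.injEq] at hc
      subst hc
      rw [lastIdx]
      simp only [List.drop_succ_cons, List.drop_zero]
      cases hl : lastIdx rest with
      | some j => simp [shiftIdx, Nat.add_comm]
      | none => simp [shiftIdx]
    | succ k =>
      simp only [List.getElem?_cons_succ] at hc
      simp only [List.length_cons, Nat.add_lt_add_iff_right] at hk
      rw [lastIdx, ih k hk hc]
      simp only [List.drop_succ_cons]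
      generalize lastIdx (rest.drop (k + 1)) = L
      cases L with
      | some v => simp [shiftIdx]; omega
      | none => simp [shiftIdx]

theorem loopA_spec (cs : List Char) (i : Nat) :
    i ≤ cs.length → loopA cs i = afterLast (lastIdx (cs.drop i)) i := by
  induction i using loopA.induct cs with
  | case1 i h res hr =>
    intro hi
    rw [loopA]
    simp only [h, dif_pos]
    rw [dif_pos hr]
    have hr1 : PySem.Chars.findFrom cs ['/'] (i : Int) none = -1 := by
      rcases PySem.Chars.findFrom_natCast_spec cs ['/'] i (le_of_lt h) with h'
      by_cases he : PySem.Chars.findFrom cs ['/'] (i : Int) none = -1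
      · exact he
      · have := (h' he).1; omega
    have hni : ¬ ['/'] <:+: cs.drop i :=
      (PySem.Chars.findFrom_natCast_eq_neg_one_iff cs ['/'] i (le_of_lt h)).mp hr1
    have hmem : '/' ∉ cs.drop i := fun hm => hni ((List.singleton_infix_iff '/' _).mpr hm)
    rw [(lastIdx_eq_none_iff _).mpr hmem, afterLast]
  | case2 i h res hr ih =>
    intro hi
    have hrr : res = PySem.Chars.findFrom cs ['/'] (i : Int) none := rfl
    rw [loopA]
    simp only [h, dif_pos]
    rw [dif_neg hr]
    rw [← hrr]
    have hs := PySem.Chars.findFrom_natCast_spec cs ['/'] i (le_of_lt h) (by rw [hrr] at hr; omega)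
    rw [← hrr] at hs
    have h1 : (i : Int) ≤ res := hs.1
    have h2 : ['/'] <+: cs.drop res.toNat := hs.2.1
    have hlt : res.toNat < cs.length := by
      by_contra hcg
      have : cs.drop res.toNat = [] := List.drop_eq_nil_of_le (by omega)
      simp [this] at h2
    have hcr : cs[res.toNat]? = some '/' := by
      obtain ⟨t, ht⟩ := h2
      have hd : cs.drop res.toNat = '/' :: t := by simpa using ht.symm
      have h0 : (cs.drop res.toNat)[0]? = some '/' := by rw [hd]; rfl
      rw [List.getElem?_drop] at h0
      simpa using h0
    rw [ih (by omega)]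
    have hsh := lastIdx_shift (cs.drop i) (res.toNat - i) (by simp; omega)
      (by rw [List.getElem?_drop]; rw [show i + (res.toNat - i) = res.toNat by omega]; exact hcr)
    rw [List.drop_drop] at hsh
    rw [show i + (res.toNat - i + 1) = res.toNat + 1 by omega] at hsh
    rw [hsh]
    generalize lastIdx (cs.drop (res.toNat + 1)) = L
    cases L <;> simp [afterLast, shiftIdx] <;> omega
  | case3 i h =>
    intro hi
    rw [loopA]
    rw [dif_neg h]
    have : cs.drop i = [] := List.drop_eq_nil_of_le (by omega)
    simp [this, lastIdx, afterLast]

theorem lastIdx_some_spec (cs : List Char) (j : Nat) (hj : lastIdx cs = some j) :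
    j < cs.length ∧ cs[j]? = some '/' := by
  induction cs generalizing j with
  | nil => simp [lastIdx] at hj
  | cons c rest ih =>
    cases hl : lastIdx rest with
    | some j' =>
      rw [lastIdx, hl] at hj
      simp at hj
      rcases ih j' hl with ⟨h1, h2⟩
      subst hj
      exact ⟨by simpa using Nat.succ_lt_succ h1, by simpa using h2⟩
    | none =>
      rw [lastIdx, hl] at hj
      by_cases hc : c = '/' <;> simp [hc] at hj
      subst hj
      simp [hc]

theorem rpart_none (cs : List Char) (hl : lastIdx cs = none) : rpart '/' cs = ([], [], cs) := by
  induction cs with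
  | nil => simp [rpart]
  | cons c rest ih =>
    rw [lastIdx] at hl
    cases hr : lastIdx rest with
    | some j => rw [hr] at hl; simp at hl
    | none =>
      rw [hr] at hl
      by_cases hc : c = '/' <;> simp [hc] at hl ⊢
      rw [rpart, ih hr]
      simp [hc]

theorem rpart_some (cs : List Char) (j : Nat) (hl : lastIdx cs = some j) :
    rpart '/' cs = (cs.take j, ['/'], cs.drop (j + 1)) := by
  induction cs generalizing j with
  | nil => simp [lastIdx] at hl
  | cons c rest ih =>
    rw [lastIdx] at hl
    cases hr : lastIdx rest with
    | some j' =>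
      rw [hr] at hl
      simp at hl
      subst hl
      rw [rpart, ih j' hr]
      simp
    | none =>
      rw [hr] at hl
      by_cases hc : c = '/' <;> simp [hc] at hl
      subst hl
      rw [rpart, rpart_none rest hr]
      simp [hc]

-- the core computation after the trailing-slash strip agrees between the two ports
theorem core_eq (fp : String) :
    (if ((loopA fp.toList 0 : Nat) : Int) = PySem.Str.len fp then ""
     else replaceBetween ((loopA fp.toList 0 : Nat) : Int) (PySem.Str.len fp) fp "") =
    (match rpart '/' fp.toList with
     | (h, s, t) => if t = [] then "" else String.ofList (h ++ s)) := by
  have hlen : PySem.Str.len fp = (fp.toList.length : Int) := PySem.Str.len_eq fp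
  have hloop := loopA_spec fp.toList 0 (Nat.zero_le _)
  simp only [List.drop_zero] at hloop
  have htk : ∀ (i : Nat), replaceBetween ((i : Nat) : Int) (PySem.Str.len fp) fp ""
      = String.ofList (fp.toList.take i) := by
    intro i
    rw [replaceBetween]
    have h1 : PySem.Chars.slice fp.toList (some 0) (some (i : Int)) = fp.toList.take i := by
      rw [PySem.Chars.slice_eq_listSlice, PySem.List.slice_zero_start, PySem.List.slice_to_natCast]
    have h2 : PySem.Chars.slice fp.toList (some ((PySem.Str.len fp : Int) + 1)) none = [] := by
      rw [PySem.Chars.slice_eq_listSlice, hlen]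
      rw [show ((fp.toList.length : Int) + 1) = ((fp.toList.length + 1 : Nat) : Int) by push_cast; ring]
      rw [PySem.List.slice_from_natCast]
      exact List.drop_eq_nil_of_le (by omega)
    rw [h1, h2]
    simp
  cases hl : lastIdx fp.toList with
  | none =>
    rw [rpart_none fp.toList hl]
    simp only [hloop, hl, afterLast]
    by_cases h0 : fp.toList = []
    · simp [h0]
    · have hlne : fp.toList.length ≠ 0 := by simpa [List.length_eq_zero_iff] using h0
      have hcond : ¬ ((0 : Nat) : Int) = PySem.Str.len fp := by rw [hlen]; omega
      rw [if_neg hcond]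
      rw [show ((0 : Nat) : Int) = (((0 : Nat) : Nat) : Int) by rfl, htk 0]
      simp [h0]
  | some j =>
    rcases lastIdx_some_spec fp.toList j hl with ⟨hjlt, hjc⟩
    rw [rpart_some fp.toList j hl]
    simp only [hloop, hl, afterLast]
    have htake : fp.toList.take j ++ ['/'] = fp.toList.take (j + 1) := by
      rw [List.take_add_one, hjc]
      rfl
    by_cases hend : j + 1 = fp.toList.length
    · have hcond : ((0 + j + 1 : Nat) : Int) = PySem.Str.len fp := by rw [hlen]; omega
      rw [if_pos hcond]
      have hdr : fp.toList.drop (j + 1) = [] := List.drop_eq_nil_of_le (by omega)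
      simp [hdr]
    · have hcond : ¬ ((0 + j + 1 : Nat) : Int) = PySem.Str.len fp := by rw [hlen]; omega
      rw [if_neg hcond]
      have hdr : fp.toList.drop (j + 1) ≠ [] := by
        intro hnil
        have hh := List.drop_eq_nil_iff.mp hnil
        omega
      rw [show ((0 + j + 1 : Nat) : Int) = (((j + 1 : Nat) : Nat) : Int) by push_cast; ring, htk (j + 1)]
      simp [hdr, htake]

-- the trailing-slash strip produces the same string in both ports
theorem strip_eq (fp : String) (hgt : 1 < PySem.Str.len fp) :
    replaceBetween ((PySem.Str.len fp : Int) - 1) (PySem.Str.len fp) fp ""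
      = String.ofList (PySem.Chars.slice fp.toList none (some (-1))) := by
  have hlen : PySem.Str.len fp = (fp.toList.length : Int) := PySem.Str.len_eq fp
  have hn : 1 < fp.toList.length := by omega
  rw [replaceBetween]
  have h1 : PySem.Chars.slice fp.toList (some 0) (some ((PySem.Str.len fp : Int) - 1))
      = fp.toList.take (fp.toList.length - 1) := by
    rw [PySem.Chars.slice_eq_listSlice, PySem.List.slice_zero_start, hlen]
    rw [show ((fp.toList.length : Int) - 1) = ((fp.toList.length - 1 : Nat) : Int) by omega]
    rw [PySem.List.slice_to_natCast]
  have h2 : PySem.Chars.slice fp.toList (some ((PySem.Str.len fp) + 1)) none = [] := by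
    rw [PySem.Chars.slice_eq_listSlice, hlen]
    rw [show ((fp.toList.length : Int) + 1) = ((fp.toList.length + 1 : Nat) : Int) by push_cast; ring]
    rw [PySem.List.slice_from_natCast]
    exact List.drop_eq_nil_of_le (by omega)
  rw [h1, h2]
  rw [PySem.Chars.slice_eq_listSlice, PySem.List.slice_to_neg_one, List.dropLast_eq_take]
  simp

-- ===== VERDICT (by name: the statement is the Claim_ definition above) =====
theorem removeLastDirFromFilepath_spec : Claim_equal_removeLastDirFromFilepath := by
  intro fp _
  unfold Spec_removeLastDirFromFilepath removeLastDirFromFilepath removeLastDirFromFilepath_alt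
  by_cases hc : (PySem.Str.endswith fp "/" && decide (1 < PySem.Str.len fp)) = true
  · simp only [hc, if_pos]
    have hgt : 1 < PySem.Str.len fp := by
      simp only [Bool.and_eq_true, decide_eq_true_eq] at hc
      exact hc.2
    rw [strip_eq fp hgt]
    exact core_eq _
  · simp only [hc, if_neg, Bool.not_eq_true]
    exact core_eq _
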